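-- pv_equiv track=rewrite | github.com/Redwoods87/CS167 | zombie.py | zombieApocalypse
-- ===== SOURCE A (Python) =====
-- def zombieApocalypse(people):
--     """
--     A zombie can convert two peiople into zombies every day. Starting with one zombie, how long does it take for the entire world population (or 7 billions people) to become zombies?
--     Produces a number of days.
--     """
--
--     zombies = 1
--     days = 0
--     while (people > 0):
--         new_zombies = 2 * zombies
--         zombies = zombies + new_zombies
--         people = people - new_zombies
--         days = days + 1
--     return days
-- ===== SOURCE B (Python) =====
-- def zombieApocalypse(people):
--     # Count base-3 digit positions: the answer is the least n with 3**n - 1 >= people,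
--     # found by repeatedly floor-dividing people by 3 instead of growing the zombie horde.
--     days = 0
--     while people > 0:
--         people //= 3
--         days += 1
--     return days
-- ===== Notes on version B (the rewrite author's own statement) =====
-- stated objective: simpler
-- what changed: Instead of simulating the horde with three variables (zombies tripling, people decreasing, day counter), B repeatedly floor-divides the remaining people by 3 and counts the divisions (the answer is the base-3 digit count of people), with no zombie-count state at all.
import Mathlib
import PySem

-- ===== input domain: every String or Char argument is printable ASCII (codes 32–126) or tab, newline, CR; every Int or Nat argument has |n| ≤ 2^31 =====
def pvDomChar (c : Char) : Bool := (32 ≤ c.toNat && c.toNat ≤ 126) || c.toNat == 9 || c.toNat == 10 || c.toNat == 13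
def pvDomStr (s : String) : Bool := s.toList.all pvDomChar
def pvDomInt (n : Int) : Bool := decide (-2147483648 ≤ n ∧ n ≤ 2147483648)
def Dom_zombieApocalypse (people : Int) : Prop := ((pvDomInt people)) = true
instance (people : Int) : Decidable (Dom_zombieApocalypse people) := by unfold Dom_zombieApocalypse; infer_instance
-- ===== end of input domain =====

-- B replaces A's three-variable horde simulation by counting floor-divisions of people by 3 (simpler, same iteration count).

-- ===== PORT A =====
-- A's while loop; the invariant 0 < zombies (true from the start, preserved) justifies termination.
def zombieLoopA (zombies people days : Int) (h : 0 < zombies) : Int :=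
  if people > 0 then
    let new_zombies := 2 * zombies
    zombieLoopA (zombies + new_zombies) (people - new_zombies) (days + 1) (by omega)
  else days
termination_by people.toNat
decreasing_by omega

def zombieApocalypse (people : Int) : Int :=
  zombieLoopA 1 people 0 (by norm_num)

-- ===== PORT B =====
def zombieLoopB (people days : Int) : Int :=
  if people > 0 then zombieLoopB (PySem.Int.floordiv people 3) (days + 1) else days
termination_by people.toNat
decreasing_by
  rename_i h
  have : PySem.Int.floordiv people 3 < people :=
    (PySem.Int.floordiv_lt_iff_lt_mul (by omega)).mpr (by omega)
  omega

def zombieApocalypse_alt (people : Int) : Int :=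
  zombieLoopB people 0

-- ===== PRECONDITION & SPEC =====
def Spec_zombieApocalypse (people : Int) (out : Int) : Prop := out = zombieApocalypse_alt people
instance (people : Int) (out : Int) : Decidable (Spec_zombieApocalypse people out) := by unfold Spec_zombieApocalypse; infer_instance

-- ===== CLAIM (what is proved, stated in full; the proofs are below) =====
def Claim_equal_zombieApocalypse : Prop := ∀ (people : Int), Dom_zombieApocalypse people → Spec_zombieApocalypse people (zombieApocalypse people)

-- ===== LEMMAS AND PROOFS =====

-- Correspondence: with z zombies, p people left and q = ceil(p / z) (stated by the bracket
-- (q-1)*z < p ≤ q*z), A's loop and B's loop return the same day count.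
theorem loopA_eq_loopB (n : Nat) : ∀ (z p d q : Int) (h : 0 < z),
    p.toNat ≤ n → (q - 1) * z < p → p ≤ q * z →
    zombieLoopA z p d h = zombieLoopB q d := by
  induction n with
  | zero =>
    intro z p d q h hn h1 h2
    have hp : ¬ p > 0 := by omega
    have hq : ¬ q > 0 := by nlinarith
    unfold zombieLoopA zombieLoopB; rw [if_neg hp, if_neg hq]
  | succ n ih =>
    intro z p d q h hn h1 h2
    by_cases hp : p > 0
    · have hq : 0 < q := by nlinarith
      unfold zombieLoopA zombieLoopB; rw [if_pos hp, if_pos hq]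
      have hq3 : PySem.Int.floordiv q 3 = q / 3 :=
        PySem.Int.floordiv_eq_ediv_of_pos (by omega)
      set q' := q / 3 with hq'
      have hr : q = 3 * q' + q % 3 ∧ 0 ≤ q % 3 ∧ q % 3 < 3 := by
        refine ⟨(Int.mul_ediv_add_emod q 3).symm.trans (by ring), Int.emod_nonneg q (by omega),
          Int.emod_lt_of_pos q (by omega)⟩
      rw [hq3]
      apply ih
      · omega
      · -- (q' - 1) * (3z) = (3q' - 3) z < p - 2z  ⟺  (3q' - 1) z < p; from (q-1)z < p, r ≥ 0
        nlinarith [hr.1, hr.2.1]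
      · -- p - 2z ≤ q' * 3z  ⟺  p ≤ (3q' + 2) z; from p ≤ qz = (3q'+r)z, r ≤ 2
        nlinarith [hr.1, hr.2.2]
    · have hq : ¬ q > 0 := by nlinarith
      unfold zombieLoopA zombieLoopB; rw [if_neg hp, if_neg hq]

-- ===== VERDICT (by name: the statement is the Claim_ definition above) =====
theorem zombieApocalypse_spec : Claim_equal_zombieApocalypse := by
  intro people _
  unfold Spec_zombieApocalypse zombieApocalypse zombieApocalypse_alt
  exact loopA_eq_loopB people.toNat 1 people 0 people (by norm_num) le_rfl (by omega) (by omega)
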